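-- pv_equiv track=rewrite | github.com/reshinto/social-research-probe | social_research_probe/utils/narratives/clusterer.py | _split_oversized
-- ===== SOURCE A (Python) =====
-- def _split_oversized(groups: list[list[dict]], max_size: int) -> list[list[dict]]:
--     """Split groups exceeding max_size by claim_type."""
--     result: list[list[dict]] = []
--     for group in groups:
--         if len(group) <= max_size:
--             result.append(group)
--         else:
--             by_type: dict[str, list[dict]] = {}
--             for c in group:
--                 by_type.setdefault(c.get("claim_type", "mixed"), []).append(c)
--             result.extend(by_type.values())
--     return result
-- ===== SOURCE B (Python) =====
-- def _split_oversized(groups: list[list[dict]], max_size: int) -> list[list[dict]]: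
--     """Split groups exceeding max_size by claim_type (helper + flat comprehension)."""
--     def pieces(group: list[dict]) -> list[list[dict]]:
--         if len(group) <= max_size:
--             return [group]
--         types = list(dict.fromkeys(c.get("claim_type", "mixed") for c in group))
--         return [[c for c in group if c.get("claim_type", "mixed") == t] for t in types]
--     return [piece for group in groups for piece in pieces(group)]
-- ===== Notes on version B (the rewrite author's own statement) =====
-- stated objective: alternative
-- what changed: Replaces the single accumulator loop with in-place dict bucketing (setdefault/append then .values()) by a per-group helper that returns the pieces -- ordered dedup of claim types via dict.fromkeys followed by one filter pass per type -- flattened over groups with a comprehension (flatMap).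
import Mathlib
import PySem

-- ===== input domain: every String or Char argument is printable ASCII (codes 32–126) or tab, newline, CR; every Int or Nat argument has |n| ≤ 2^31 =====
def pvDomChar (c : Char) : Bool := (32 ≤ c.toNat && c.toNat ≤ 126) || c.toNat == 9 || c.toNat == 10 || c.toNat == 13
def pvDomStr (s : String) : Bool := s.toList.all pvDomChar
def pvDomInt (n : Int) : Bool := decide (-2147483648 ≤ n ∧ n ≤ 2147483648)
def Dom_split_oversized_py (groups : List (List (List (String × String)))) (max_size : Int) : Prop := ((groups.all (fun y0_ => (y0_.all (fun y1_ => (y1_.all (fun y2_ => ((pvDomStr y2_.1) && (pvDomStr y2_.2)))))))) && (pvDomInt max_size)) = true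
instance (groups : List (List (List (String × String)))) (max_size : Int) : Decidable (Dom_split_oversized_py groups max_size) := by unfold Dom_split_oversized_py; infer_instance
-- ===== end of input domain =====

-- B replaces A's single accumulator loop with dict bucketing by a per-group helper (ordered dedup of claim types, then one filter per type) flattened over groups (alternative decomposition, same results).


-- ===== PORT A =====
-- c.get("claim_type", "mixed") on the assoc-list dict c → (PySem.Dict.mk c).getD … (first match, exact).
-- by_type.setdefault(k, []).append(c) → d.modify k [] (· ++ [c]) (exact: insert [] if absent, then append).
def split_oversized_py (groups : List (List (List (String × String)))) (max_size : Int) : List (List (List (String × String))) :=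
  groups.foldl (fun result group =>
    if (group.length : Int) ≤ max_size then result ++ [group]
    else
      let by_type := group.foldl
        (fun d c => d.modify ((PySem.Dict.mk c).getD "claim_type" "mixed") [] (fun b => b ++ [c]))
        PySem.Dict.empty
      result ++ by_type.values) []

-- ===== PORT B =====
-- pieces(group): list(dict.fromkeys(…)) → PySem.List.dedup (first occurrences, in order).
def pvPieces (max_size : Int) (group : List (List (String × String))) : List (List (List (String × String))) :=
  if (group.length : Int) ≤ max_size then [group]
  else
    let types := PySem.List.dedup (group.map (fun c => (PySem.Dict.mk c).getD "claim_type" "mixed"))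
    types.map (fun t => group.filter (fun c => (PySem.Dict.mk c).getD "claim_type" "mixed" == t))

-- '[piece for group in groups for piece in pieces(group)]' → flatMap.
def split_oversized_py_alt (groups : List (List (List (String × String)))) (max_size : Int) : List (List (List (String × String))) :=
  groups.flatMap (pvPieces max_size)

-- ===== PRECONDITION & SPEC =====
def Spec_split_oversized_py (groups : List (List (List (String × String)))) (max_size : Int) (out : List (List (List (String × String)))) : Prop := out = split_oversized_py_alt groups max_size
instance (groups : List (List (List (String × String)))) (max_size : Int) (out : List (List (List (String × String)))) : Decidable (Spec_split_oversized_py groups max_size out) := by unfold Spec_split_oversized_py; infer_instance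

-- ===== CLAIM =====
def Claim_equal_split_oversized_py : Prop := ∀ (groups : List (List (List (String × String)))) (max_size : Int), Dom_split_oversized_py groups max_size → Spec_split_oversized_py groups max_size (split_oversized_py groups max_size)

-- ===== LEMMAS AND PROOFS =====

-- Any dict with distinct keys lists its values as getD over its keys.
theorem pv_values_eq_keys_map {κ ν : Type} [BEq κ] [LawfulBEq κ]
    (d : PySem.Dict κ ν) (hnd : d.keys.Nodup) (d0 : ν) :
    d.values = d.keys.map (fun k => d.getD k d0) := by
  have h1 : d.keys.map (fun k => d.getD k d0) = d.items.map (fun p => d.getD p.1 d0) := by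
    simp [PySem.Dict.keys, List.map_map, Function.comp]
  rw [h1]
  have h2 : d.items.map (fun p => d.getD p.1 d0) = d.items.map (fun p => p.2) := by
    apply List.map_congr_left
    intro p hp
    exact PySem.Dict.getD_of_mem_items d hp hnd d0
  rw [h2]
  rfl

-- The bucket dict built by A's loop has values = (deduped key list).map (filter by that key).
theorem pv_bucket_values {β : Type} (key : β → String) (l : List β) :
    (l.foldl (fun d c => d.modify (key c) [] (fun b => b ++ [c]))
        (PySem.Dict.empty : PySem.Dict String (List β))).values
    = (PySem.List.dedup (l.map key)).map (fun t => l.filter (fun c => key c == t)) := by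
  set d := l.foldl (fun d c => d.modify (key c) [] (fun b => b ++ [c]))
      (PySem.Dict.empty : PySem.Dict String (List β)) with hd
  have hk : d.keys = PySem.Set.ofList (l.map key) := by
    rw [hd, PySem.Dict.keys_foldl_modify_key l key [] (fun _ c b => b ++ [c])]
    simp [PySem.Set.update, PySem.Set.ofList_eq_foldl]
  have hnd : d.keys.Nodup := by
    rw [hd]
    exact PySem.Dict.nodup_keys_foldl_modify_key l key [] (fun _ c b => b ++ [c]) _ (by simp)
  have hg : ∀ t, d.getD t [] = l.filter (fun c => key c == t) := by
    intro t
    have hmap : d = (l.map (fun c => (key c, c))).foldl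
        (fun d p => d.modify p.1 [] (fun b => b ++ [p.2])) PySem.Dict.empty := by
      rw [hd, List.foldl_map]
    rw [hmap, PySem.Dict.getD_foldl_modify_append]
    simp [List.filter_map, List.map_map, Function.comp_def]
  rw [pv_values_eq_keys_map d hnd [], hk, PySem.List.dedup_eq_ofList]
  exact List.map_congr_left (fun t _ => hg t)

-- A's per-group contribution equals B's pieces.
theorem pv_step_eq_pieces (max_size : Int) (group : List (List (String × String))) :
    (if (group.length : Int) ≤ max_size then [group]
     else (group.foldl
        (fun d c => d.modify ((PySem.Dict.mk c).getD "claim_type" "mixed") [] (fun b => b ++ [c]))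
        PySem.Dict.empty).values)
    = pvPieces max_size group := by
  unfold pvPieces
  by_cases h : (group.length : Int) ≤ max_size
  · simp [h]
  · simp only [h, if_false]
    exact pv_bucket_values (fun c => (PySem.Dict.mk c).getD "claim_type" "mixed") group

-- ===== VERDICT =====
theorem split_oversized_py_spec : Claim_equal_split_oversized_py := by
  intro groups max_size _
  unfold Spec_split_oversized_py split_oversized_py split_oversized_py_alt
  have h : ∀ result group, (if (group.length : Int) ≤ max_size then result ++ [group]
      else result ++ (group.foldl
        (fun d c => d.modify ((PySem.Dict.mk c).getD "claim_type" "mixed") [] (fun b => b ++ [c]))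
        PySem.Dict.empty).values)
      = result ++ pvPieces max_size group := by
    intro result group
    rw [← pv_step_eq_pieces max_size group]
    split_ifs <;> rfl
  calc groups.foldl (fun result group =>
        if (group.length : Int) ≤ max_size then result ++ [group]
        else result ++ (group.foldl
          (fun d c => d.modify ((PySem.Dict.mk c).getD "claim_type" "mixed") [] (fun b => b ++ [c]))
          PySem.Dict.empty).values) []
      = groups.foldl (fun result group => result ++ pvPieces max_size group) [] := by
        apply PySem.List.foldl_congr_mem; intro acc x _; exact h acc x
    _ = [] ++ groups.flatMap (pvPieces max_size) :=
        PySem.List.foldl_append_eq_flatMap (pvPieces max_size) groups []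
    _ = groups.flatMap (pvPieces max_size) := by simp
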